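-- pv_equiv track=rewrite | github.com/moth-quantum/QuantumArtHack | QPIXL/helper.py | isfwht
-- ===== SOURCE A (Python) =====
-- def isfwht(a):
--     """Inverse of the walsh hadamard transform
--
--     Args:
--         a (array): array of values
--
--     Returns:
--         array: array with inverse transformed applied, inplace
--     """
--     n = len(a)
--     j = 1
--     while j < n:
--         for i in range(n):
--             if (i & j) == 0:
--                 j1 = i + j
--                 x = a[i]
--                 y = a[j1]
--                 a[i], a[j1] = (x + y), (x - y)
--         j *= 2
--     return a
-- ===== SOURCE B (Python) =====
-- def isfwht(a):
--     """Inverse fast Walsh-Hadamard transform, via recursive divide-and-conquer: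
--     transform each half, then combine them with element-wise sum/difference.
--     The result is written back into a (in place, matching A's mutation)."""
--     def rec(x):
--         if len(x) <= 1:
--             return x
--         m = len(x) // 2
--         left = rec(x[:m])
--         right = rec(x[m:])
--         return [l + r for l, r in zip(left, right)] + \
--                [l - r for l, r in zip(left, right)]
--     a[:] = rec(a)
--     return a
-- ===== Notes on version B (the rewrite author's own statement) =====
-- stated objective: alternative
-- what changed: A's iterative in-place masked butterfly loop (doubling stride j, scanning all indices with i & j == 0) is replaced by a recursive divide-and-conquer: recursively transform each half of the list, then build the result as the element-wise sums followed by the element-wise differences of the two transformed halves; no index arithmetic, masks or in-place butterflies remain.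
import Mathlib
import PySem

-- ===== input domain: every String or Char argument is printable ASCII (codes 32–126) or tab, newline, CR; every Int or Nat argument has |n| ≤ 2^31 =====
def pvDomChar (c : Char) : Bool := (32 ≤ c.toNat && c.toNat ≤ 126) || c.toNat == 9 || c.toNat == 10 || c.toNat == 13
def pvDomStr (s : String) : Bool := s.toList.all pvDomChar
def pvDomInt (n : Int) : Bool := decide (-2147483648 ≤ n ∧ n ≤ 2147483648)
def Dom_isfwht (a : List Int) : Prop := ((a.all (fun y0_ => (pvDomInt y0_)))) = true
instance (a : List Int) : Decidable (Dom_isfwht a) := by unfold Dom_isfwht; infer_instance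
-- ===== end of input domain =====

-- B replaces A's iterative in-place masked butterfly by a recursive divide-and-conquer
-- (transform each half, combine as element-wise sums then differences); both Pythons
-- write the result into `a` in place, the equivalence proved is about the return value.

-- ===== PORT A =====
-- a[i], a[j1] reads/writes: inside Pre_ every index is in range, where getD/set are exact.
def isfwhtStep (j : Nat) (a : List Int) (i : Nat) : List Int :=
  if i &&& j == 0 then
    let j1 := i + j
    let x := a.getD i 0
    let y := a.getD j1 0
    (a.set i (x + y)).set j1 (x - y)
  else a

-- the `while j < n` loop; j doubles from 1, so fuel = n is never exhausted (2^(n-1) ≥ n).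
def isfwhtLoop (fuel n j : Nat) (a : List Int) : List Int :=
  match fuel with
  | 0 => a
  | fuel + 1 =>
    if j < n then isfwhtLoop fuel n (j * 2) ((List.range n).foldl (isfwhtStep j) a)
    else a

def isfwht (a : List Int) : List Int :=
  isfwhtLoop a.length a.length 1 a

-- ===== PORT B =====
-- the inner helper `rec` of Source B: transform each half, then sums ++ differences
def isfwhtRec (x : List Int) : List Int :=
  if _h : x.length ≤ 1 then x
  else
    let m := x.length / 2
    let left := isfwhtRec (x.take m)
    let right := isfwhtRec (x.drop m)
    List.zipWith (· + ·) left right ++ List.zipWith (· - ·) left right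
termination_by x.length
decreasing_by
  · simp only [List.length_take]; omega
  · simp only [List.length_drop]; omega

-- `a[:] = rec(a); return a`: the returned value is rec(a)
def isfwht_alt (a : List Int) : List Int := isfwhtRec a

-- ===== PRECONDITION & SPEC =====
-- Exactly the inputs on which Python A returns: on any length that is neither 0 nor a
-- power of two, A hits an out-of-range a[i+j] and raises IndexError.
def Pre_isfwht (a : List Int) : Prop := a.length = 0 ∨ ∃ k ≤ a.length, a.length = 2 ^ k
instance (a : List Int) : Decidable (Pre_isfwht a) := by unfold Pre_isfwht; infer_instance

def pvWitness_isfwht : List Int := [3, -1, 2, 7]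

def Spec_isfwht (a : List Int) (out : List Int) : Prop := out = isfwht_alt a
instance (a : List Int) (out : List Int) : Decidable (Spec_isfwht a out) := by unfold Spec_isfwht; infer_instance

-- ===== CLAIM (what is proved, stated in full; the proofs are below) =====
def Claim_equal_isfwht : Prop := ∀ (a : List Int), Dom_isfwht a → Pre_isfwht a → Spec_isfwht a (isfwht a)

-- ===== LEMMAS AND PROOFS =====

-- proof-only butterfly step (one (k, k+h) pair) and one block of h such pairs
def bStep (h : Nat) (a : List Int) (k : Nat) : List Int :=
  let x := a.getD k 0
  let y := a.getD (k + h) 0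
  (a.set k (x + y)).set (k + h) (x - y)

def bBlock (h : Nat) (a : List Int) (start : Nat) : List Int :=
  (List.range' start h).foldl (bStep h) a

-- one of A's passes (stride j, over the whole array), and the first K passes in order
def aPass (j n : Nat) (a : List Int) : List Int :=
  (List.range n).foldl (isfwhtStep j) a

def passesUp (n : Nat) : Nat → Nat → List Int → List Int
  | _, 0, a => a
  | t, d + 1, a => passesUp n (t + 1) d (aPass (2 ^ t) n a)

-- lengths are preserved by every step, hence by every fold
lemma foldl_len {f : List Int → Nat → List Int} (hf : ∀ a i, (f a i).length = a.length) :
    ∀ (l : List Nat) (a : List Int), (l.foldl f a).length = a.length := by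
  intro l
  induction l with
  | nil => intro a; rfl
  | cons x xs ih => intro a; simp only [List.foldl_cons, ih, hf]

lemma len_bStep (h : Nat) (a : List Int) (k : Nat) : (bStep h a k).length = a.length := by
  simp [bStep]

lemma len_isfwhtStep (j : Nat) (a : List Int) (i : Nat) :
    (isfwhtStep j a i).length = a.length := by
  unfold isfwhtStep; split <;> simp

lemma len_bBlock (h : Nat) (a : List Int) (s : Nat) : (bBlock h a s).length = a.length :=
  foldl_len (fun a k => len_bStep h a k) _ _

-- mask facts: i &&& 2^t tests bit t of i
lemma mask_low {t i : Nat} (h : i < 2 ^ t) : i &&& 2 ^ t = 0 := by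
  rw [Nat.and_two_pow, Nat.testBit_eq_false_of_lt h]
  simp

lemma mask_high {t i : Nat} (h1 : 2 ^ t ≤ i) (h2 : i < 2 ^ (t + 1)) : i &&& 2 ^ t ≠ 0 := by
  have hd : i / 2 ^ t = 1 := by
    rw [pow_succ] at h2
    exact Nat.div_eq_of_lt_le (by omega) (by omega)
  rw [Nat.and_two_pow, Nat.testBit_eq_decide_div_mod_eq, hd]
  simp [Nat.pow_eq_zero]

lemma mask_shift (t i : Nat) : (2 ^ (t + 1) + i) &&& 2 ^ t = i &&& 2 ^ t := by
  have hb : (2 ^ (t + 1) + i).testBit t = i.testBit t := by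
    calc (2 ^ (t + 1) + i).testBit t
        = ((2 ^ (t + 1) + i) % 2 ^ (t + 1)).testBit t := by
          rw [Nat.testBit_mod_two_pow]; simp
      _ = (i % 2 ^ (t + 1)).testBit t := by rw [Nat.add_mod_left]
      _ = i.testBit t := by rw [Nat.testBit_mod_two_pow]; simp
  rw [Nat.and_two_pow, Nat.and_two_pow, hb]

-- append-shift facts for a single butterfly step
lemma getD_append_right (b c : List Int) (k : Nat) (d : Int) :
    (b ++ c).getD (b.length + k) d = c.getD k d := by
  simp [List.getD, List.getElem?_append_right (Nat.le_add_right b.length k)]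

lemma set_append_shift (b c : List Int) (k : Nat) (v : Int) :
    (b ++ c).set (b.length + k) v = b ++ c.set k v := by
  rw [List.set_append_right _ _ (Nat.le_add_right b.length k)]
  simp

lemma bStep_shift (h : Nat) (b c : List Int) (k : Nat) :
    bStep h (b ++ c) (b.length + k) = b ++ bStep h c k := by
  simp only [bStep]
  rw [show b.length + k + h = b.length + (k + h) from by omega]
  rw [getD_append_right, getD_append_right, set_append_shift, set_append_shift]

lemma isfwhtStep_shift (t : Nat) (b c : List Int) (i : Nat) (hb : b.length = 2 ^ (t + 1)) :
    isfwhtStep (2 ^ t) (b ++ c) (2 ^ (t + 1) + i) = b ++ isfwhtStep (2 ^ t) c i := by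
  simp only [isfwhtStep, mask_shift]
  split
  · rw [show 2 ^ (t + 1) + i + 2 ^ t = 2 ^ (t + 1) + (i + 2 ^ t) from by omega, ← hb]
    rw [getD_append_right, getD_append_right, set_append_shift, set_append_shift]
  · rfl

lemma bStep_left (h : Nat) (b c : List Int) (k : Nat) (hk : k + h < b.length) :
    bStep h (b ++ c) k = bStep h b k ++ c := by
  simp only [bStep]
  rw [List.getD_append _ _ _ _ (by omega), List.getD_append _ _ _ _ hk,
    List.set_append_left _ _ (by omega),
    List.set_append_left _ _ (by simpa using hk)]

-- i in the upper half of the first block: A's mask rejects it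
lemma isfwhtStep_skip (t : Nat) (a : List Int) (i : Nat) (h1 : 2 ^ t ≤ i) (h2 : i < 2 ^ (t + 1)) :
    isfwhtStep (2 ^ t) a i = a := by
  simp [isfwhtStep, mask_high h1 h2]

-- i in the lower half of the first block: A's step is one butterfly step inside b
lemma isfwhtStep_left (t : Nat) (b c : List Int) (i : Nat) (hi : i < 2 ^ t)
    (hb : b.length = 2 ^ (t + 1)) :
    isfwhtStep (2 ^ t) (b ++ c) i = bStep (2 ^ t) b i ++ c := by
  rw [isfwhtStep, if_pos (by simpa using mask_low hi)]
  exact bStep_left _ _ _ _ (by rw [hb, pow_succ]; omega)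

-- generic fold shapes
lemma foldl_id {f : List Int → Nat → List Int} (l : List Nat) (a : List Int)
    (hf : ∀ s k, k ∈ l → f s k = s) : l.foldl f a = a := by
  induction l generalizing a with
  | nil => rfl
  | cons x xs ih =>
    rw [List.foldl_cons, hf a x (List.mem_cons_self), ih]
    intro s k hk; exact hf s k (List.mem_cons_of_mem _ hk)

lemma foldl_shift {f g : List Int → Nat → List Int} (b : List Int) (l : List Nat)
    (hfg : ∀ c k, k ∈ l → f (b ++ c) k = b ++ g c k) :
    ∀ c, l.foldl f (b ++ c) = b ++ l.foldl g c := by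
  induction l with
  | nil => intro c; rfl
  | cons x xs ih =>
    intro c
    rw [List.foldl_cons, hfg c x (List.mem_cons_self), List.foldl_cons]
    exact ih (fun c k hk => hfg c k (List.mem_cons_of_mem _ hk)) _

lemma foldl_left_zone {f g : List Int → Nat → List Int} (c : List Int) (l : List Nat) (L : Nat)
    (hg : ∀ b k, k ∈ l → (g b k).length = b.length)
    (hfg : ∀ b k, k ∈ l → b.length = L → f (b ++ c) k = g b k ++ c) :
    ∀ b, b.length = L → l.foldl f (b ++ c) = (l.foldl g b) ++ c := by
  induction l with
  | nil => intro b _; rfl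
  | cons x xs ih =>
    intro b hb
    rw [List.foldl_cons, hfg b x (List.mem_cons_self) hb, List.foldl_cons]
    exact ih (fun b k hk => hg b k (List.mem_cons_of_mem _ hk))
      (fun b k hk => hfg b k (List.mem_cons_of_mem _ hk)) _
      ((hg b x (List.mem_cons_self)).trans hb)

lemma bBlock_shift (h : Nat) (b c : List Int) (s : Nat) :
    bBlock h (b ++ c) (b.length + s) = b ++ bBlock h c s := by
  unfold bBlock
  rw [List.range'_eq_map_range, List.range'_eq_map_range, List.foldl_map, List.foldl_map]
  refine foldl_shift b _ (fun c' k _ => ?_) c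
  rw [show b.length + s + k = b.length + (s + k) from by omega]
  exact bStep_shift h b c' (s + k)

-- a block that lies entirely inside the left part
lemma bBlock_left (h : Nat) (b c : List Int) (s : Nat) (hs : s + 2 * h ≤ b.length) :
    bBlock h (b ++ c) s = bBlock h b s ++ c := by
  unfold bBlock
  refine foldl_left_zone c _ b.length (fun bb k _ => len_bStep h bb k)
    (fun bb k hk hbb => ?_) b rfl
  have hki := List.mem_range'_1.mp hk
  exact bStep_left h bb c _ (by omega)

-- A's masked scan over m blocks of size 2·2^t equals the fold of blocks
lemma pass_eq (t : Nat) : ∀ (m : Nat) (a : List Int), a.length = 2 * 2 ^ t * m →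
    (List.range (2 * 2 ^ t * m)).foldl (isfwhtStep (2 ^ t)) a
      = ((List.range m).map (fun b => 2 * 2 ^ t * b)).foldl (bBlock (2 ^ t)) a := by
  intro m
  induction m with
  | zero => intro a _; simp
  | succ m ih =>
    intro a ha
    have hC : 2 * 2 ^ t * (m + 1) = 2 * 2 ^ t + 2 * 2 ^ t * m := by ring
    obtain ⟨b, c, rfl, hb, hc⟩ :
        ∃ b c, a = b ++ c ∧ b.length = 2 * 2 ^ t ∧ c.length = 2 * 2 ^ t * m := by
      refine ⟨a.take (2 * 2 ^ t), a.drop (2 * 2 ^ t), (List.take_append_drop _ a).symm, ?_, ?_⟩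
      · rw [List.length_take, ha, hC]; exact Nat.min_eq_left (Nat.le_add_right _ _)
      · rw [List.length_drop, ha, hC]; exact Nat.add_sub_cancel_left _ _
    have hfirst : ∀ (b' : List Int), b'.length = 2 * 2 ^ t →
        (List.range (2 * 2 ^ t)).foldl (isfwhtStep (2 ^ t)) (b' ++ c)
          = ((List.range (2 ^ t)).foldl (bStep (2 ^ t)) b') ++ c := by
      intro b' hb'
      rw [show 2 * 2 ^ t = 2 ^ t + 2 ^ t from by ring, List.range_add, List.foldl_append,
        List.foldl_map]
      rw [foldl_left_zone c (List.range (2 ^ t)) (2 * 2 ^ t)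
        (fun bb k _ => len_bStep _ bb k)
        (fun bb k hk hbb =>
          isfwhtStep_left t bb c k (List.mem_range.mp hk) (by rw [hbb]; ring)) b' hb']
      exact foldl_id _ _ (fun s k hk =>
        isfwhtStep_skip t s (2 ^ t + k) (Nat.le_add_right _ _)
          (by have := List.mem_range.mp hk; rw [pow_succ]; omega))
    rw [hC, List.range_add, List.foldl_append, hfirst b hb, List.foldl_map]
    set B := (List.range (2 ^ t)).foldl (bStep (2 ^ t)) b with hB
    have hBlen : B.length = 2 * 2 ^ t := by
      rw [hB, foldl_len (fun a i => len_bStep _ a i)]; exact hb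
    rw [foldl_shift (g := isfwhtStep (2 ^ t)) B _ (fun c' k _ => by
        rw [show 2 * 2 ^ t + k = 2 ^ (t + 1) + k from by rw [pow_succ]; ring]
        exact isfwhtStep_shift t B c' k (by rw [hBlen]; ring)) c]
    rw [ih c hc]
    rw [List.range_succ_eq_map, List.map_cons, List.foldl_cons, List.map_map]
    have hhead : bBlock (2 ^ t) (b ++ c) (2 * 2 ^ t * 0) = B ++ c := by
      rw [Nat.mul_zero, bBlock, ← List.range_eq_range']
      exact foldl_left_zone c _ (2 * 2 ^ t) (fun bb k _ => len_bStep _ bb k)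
        (fun bb k hk hbb => bStep_left (2 ^ t) bb c k
          (by have := List.mem_range.mp hk; omega)) b hb
    rw [hhead, List.foldl_map, List.foldl_map]
    refine (foldl_shift (g := fun s x => bBlock (2 ^ t) s (2 * 2 ^ t * x)) B
      (List.range m) (fun c' x _ => ?_) c).symm
    simp only [Function.comp_apply, Nat.succ_eq_add_one]
    rw [show 2 * 2 ^ t * (x + 1) = B.length + 2 * 2 ^ t * x from by rw [hBlen]; ring]
    exact bBlock_shift (2 ^ t) B c' _

-- a block fold over m1 + m2 blocks on L ++ R splits at the seam
lemma blockfold_split (h m1 m2 : Nat) (_hh : 0 < h) (L R : List Int)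
    (hL : L.length = 2 * h * m1) :
    ((List.range (m1 + m2)).map (fun b => 2 * h * b)).foldl (bBlock h) (L ++ R)
      = ((List.range m1).map (fun b => 2 * h * b)).foldl (bBlock h) L
        ++ ((List.range m2).map (fun b => 2 * h * b)).foldl (bBlock h) R := by
  rw [List.range_add, List.map_append, List.foldl_append, List.map_map]
  simp only [List.foldl_map]
  have h1 : (List.range m1).foldl (fun s b => bBlock h s (2 * h * b)) (L ++ R)
      = (List.range m1).foldl (fun s b => bBlock h s (2 * h * b)) L ++ R := by
    refine foldl_left_zone R _ L.length (fun bb k _ => len_bBlock h bb _)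
      (fun bb k hk hbb => ?_) L rfl
    have := List.mem_range.mp hk
    exact bBlock_left h bb R _ (by rw [hbb, hL]; nlinarith)
  rw [h1]
  set L' := (List.range m1).foldl (fun s b => bBlock h s (2 * h * b)) L with hL'
  have hL'len : L'.length = L.length :=
    foldl_len (fun a i => len_bBlock h a _) _ _
  refine foldl_shift (g := fun s b => bBlock h s (2 * h * b)) L' (List.range m2)
    (fun c' x _ => ?_) R
  simp only [Function.comp_apply]
  rw [show 2 * h * (m1 + x) = L'.length + 2 * h * x from by rw [hL'len, hL]; ring]
  exact bBlock_shift h L' c' _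

-- one of A's passes at a stride strictly below the half size splits at the seam
lemma pass_split (t K : Nat) (ht : t < K) (L R : List Int)
    (hL : L.length = 2 ^ K) (hR : R.length = 2 ^ K) :
    aPass (2 ^ t) (2 ^ (K + 1)) (L ++ R)
      = aPass (2 ^ t) (2 ^ K) L ++ aPass (2 ^ t) (2 ^ K) R := by
  have hm : 2 * 2 ^ t * 2 ^ (K - t - 1) = 2 ^ K := by
    rw [show 2 * 2 ^ t = 2 ^ (t + 1) from by ring, ← pow_add]
    congr 1; omega
  have hm2 : 2 * 2 ^ t * (2 ^ (K - t - 1) + 2 ^ (K - t - 1)) = 2 ^ (K + 1) := by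
    rw [Nat.mul_add, hm, pow_succ]; ring
  unfold aPass
  rw [show (List.range (2 ^ (K + 1))) = List.range (2 * 2 ^ t * (2 ^ (K - t - 1) + 2 ^ (K - t - 1))) from by rw [hm2]]
  rw [pass_eq t _ (L ++ R) (by rw [hm2]; simp [hL, hR]; rw [pow_succ]; ring)]
  rw [show (List.range (2 ^ K)) = List.range (2 * 2 ^ t * 2 ^ (K - t - 1)) from by rw [hm]]
  rw [pass_eq t _ L (by rw [hm, hL]), pass_eq t _ R (by rw [hm, hR])]
  exact blockfold_split (2 ^ t) _ _ (Nat.two_pow_pos t) L R (by rw [hm, hL])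

-- the first d passes (strides 2^t … 2^(t+d-1)) split at the seam while all strides fit a half
lemma passesUp_split (K : Nat) : ∀ (d t : Nat), t + d ≤ K → ∀ (L R : List Int),
    L.length = 2 ^ K → R.length = 2 ^ K →
    passesUp (2 ^ (K + 1)) t d (L ++ R) = passesUp (2 ^ K) t d L ++ passesUp (2 ^ K) t d R := by
  intro d
  induction d with
  | zero => intro t _ L R _ _; rfl
  | succ d ih =>
    intro t htd L R hL hR
    simp only [passesUp]
    rw [pass_split t K (by omega) L R hL hR]
    exact ih (t + 1) (by omega) _ _
      (by unfold aPass; rw [foldl_len (fun a i => len_isfwhtStep _ a i)]; exact hL)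
      (by unfold aPass; rw [foldl_len (fun a i => len_isfwhtStep _ a i)]; exact hR)

-- peel the LAST pass off the front-first recursion
lemma passesUp_snoc (n : Nat) : ∀ (d t : Nat) (a : List Int),
    passesUp n t (d + 1) a = aPass (2 ^ (t + d)) n (passesUp n t d a) := by
  intro d
  induction d with
  | zero => intro t a; simp [passesUp]
  | succ d ih =>
    intro t a
    calc passesUp n t (d + 1 + 1) a
        = passesUp n (t + 1) (d + 1) (aPass (2 ^ t) n a) := rfl
      _ = aPass (2 ^ (t + 1 + d)) n (passesUp n (t + 1) d (aPass (2 ^ t) n a)) := ih _ _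
      _ = aPass (2 ^ (t + (d + 1))) n (passesUp n t (d + 1) a) := by
          rw [show t + 1 + d = t + (d + 1) from by omega]; rfl

-- specialisations of the append lemmas at the seam itself (k = 0)
lemma getD_mid (b c : List Int) (d : Int) : (b ++ c).getD b.length d = c.getD 0 d := by
  have h := getD_append_right b c 0 d
  simpa using h

lemma set_mid (b c : List Int) (v : Int) : (b ++ c).set b.length v = b ++ c.set 0 v := by
  have h := set_append_shift b c 0 v
  simpa using h

-- the full butterfly of the top-level block = sums ++ differences
lemma butterfly (h : Nat) : ∀ (m : Nat) (D1 L D2 R : List Int), D1.length + m = h →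
    D2.length = D1.length → L.length = m → R.length = m →
    (List.range' D1.length m).foldl (bStep h) (D1 ++ (L ++ (D2 ++ R)))
      = D1 ++ (List.zipWith (· + ·) L R ++ (D2 ++ List.zipWith (· - ·) L R)) := by
  intro m
  induction m with
  | zero =>
    intro D1 L D2 R _ _ hL hR
    rw [List.length_eq_zero_iff.mp hL, List.length_eq_zero_iff.mp hR]
    simp only [List.zipWith_nil_right, List.nil_append]
    rfl
  | succ m ih =>
    intro D1 L D2 R hh hD2 hL hR
    have hLne : L ≠ [] := by rintro rfl; simp at hL
    have hRne : R ≠ [] := by rintro rfl; simp at hR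
    obtain ⟨x, L', rfl⟩ := List.exists_cons_of_ne_nil hLne
    obtain ⟨y, R', rfl⟩ := List.exists_cons_of_ne_nil hRne
    have hL' : L'.length = m := by simpa using hL
    have hR' : R'.length = m := by simpa using hR
    rw [List.range'_succ, List.foldl_cons]
    have hassoc : (x :: L' ++ (D2 ++ y :: R')) = (x :: L') ++ (D2 ++ y :: R') := rfl
    have hstep :
        bStep h (D1 ++ (x :: L' ++ (D2 ++ y :: R'))) D1.length
          = D1 ++ ((x + y) :: L' ++ (D2 ++ (x - y) :: R')) := by
      simp only [bStep]
      have hg1 : (D1 ++ (x :: L' ++ (D2 ++ y :: R'))).getD D1.length 0 = x := by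
        rw [getD_mid]; rfl
      have hg2 : (D1 ++ (x :: L' ++ (D2 ++ y :: R'))).getD (D1.length + h) 0 = y := by
        rw [getD_append_right, hassoc,
          show h = (x :: L').length + D2.length from by simp [hL']; omega,
          getD_append_right, getD_mid]
        rfl
      rw [hg1, hg2]
      have hs1 : (D1 ++ (x :: L' ++ (D2 ++ y :: R'))).set D1.length (x + y)
          = D1 ++ ((x + y) :: L' ++ (D2 ++ y :: R')) := by
        rw [set_mid]; rfl
      rw [hs1, set_append_shift]
      congr 1
      rw [show ((x + y) :: L' ++ (D2 ++ y :: R')) = ((x + y) :: L') ++ (D2 ++ y :: R') from rfl,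
        show h = ((x + y) :: L').length + D2.length from by simp [hL']; omega,
        set_append_shift, set_mid]
      rfl
    rw [hstep]
    have h2 := ih (D1 ++ [x + y]) L' (D2 ++ [x - y]) R'
      (by simp; omega) (by simp [hD2]) hL' hR'
    simp only [List.append_assoc, List.cons_append, List.nil_append,
      List.length_append, List.length_cons, List.length_nil] at h2 ⊢
    simp only [List.zipWith_cons_cons]
    exact h2

-- unfolding B's recursion on a length-2^(K+1) list split in halves
lemma isfwhtRec_split (K : Nat) (L R : List Int) (hL : L.length = 2 ^ K) (hR : R.length = 2 ^ K) :
    isfwhtRec (L ++ R)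
      = List.zipWith (· + ·) (isfwhtRec L) (isfwhtRec R)
        ++ List.zipWith (· - ·) (isfwhtRec L) (isfwhtRec R) := by
  have hlen : (L ++ R).length = 2 ^ (K + 1) := by simp [hL, hR, pow_succ]; ring
  have h2 : ¬ (L ++ R).length ≤ 1 := by
    rw [hlen]; have := Nat.one_lt_two_pow_iff.mpr (Nat.succ_ne_zero K); omega
  have hm : (L ++ R).length / 2 = 2 ^ K := by rw [hlen, pow_succ]; omega
  have ht : (L ++ R).take ((L ++ R).length / 2) = L := by
    rw [hm, ← hL, List.take_left]
  have hd : (L ++ R).drop ((L ++ R).length / 2) = R := by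
    rw [hm, ← hL, List.drop_left]
  rw [isfwhtRec, dif_neg h2]
  simp only [ht, hd]

-- passesUp preserves the length
lemma len_passesUp (n : Nat) : ∀ (d t : Nat) (a : List Int),
    (passesUp n t d a).length = a.length := by
  intro d
  induction d with
  | zero => intro t a; rfl
  | succ d ih =>
    intro t a
    show (passesUp n (t + 1) d (aPass (2 ^ t) n a)).length = a.length
    rw [ih]
    unfold aPass
    exact foldl_len (fun a i => len_isfwhtStep _ a i) _ _

-- the heart: A's passes 2^0 … 2^(K-1) on a length-2^K list compute B's recursion
lemma passes_eq_rec : ∀ (K : Nat) (a : List Int), a.length = 2 ^ K →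
    passesUp (2 ^ K) 0 K a = isfwhtRec a := by
  intro K
  induction K with
  | zero =>
    intro a ha
    rw [isfwhtRec, dif_pos (by omega)]; rfl
  | succ K ih =>
    intro a ha
    obtain ⟨L, R, rfl, hL, hR⟩ :
        ∃ L R, a = L ++ R ∧ L.length = 2 ^ K ∧ R.length = 2 ^ K := by
      refine ⟨a.take (2 ^ K), a.drop (2 ^ K), (List.take_append_drop _ a).symm, ?_, ?_⟩
      · rw [List.length_take, ha, pow_succ]; omega
      · rw [List.length_drop, ha, pow_succ]; omega
    rw [passesUp_snoc, Nat.zero_add, passesUp_split K K 0 (by omega) L R hL hR]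
    rw [isfwhtRec_split K L R hL hR, ← ih L hL, ← ih R hR]
    set L' := passesUp (2 ^ K) 0 K L with hL'
    set R' := passesUp (2 ^ K) 0 K R with hR'
    have hL'len : L'.length = 2 ^ K := by rw [hL', len_passesUp]; exact hL
    have hR'len : R'.length = 2 ^ K := by rw [hR', len_passesUp]; exact hR
    -- the top pass is one full-width block, i.e. the butterfly = sums ++ differences
    unfold aPass
    rw [show (List.range (2 ^ (K + 1))) = List.range (2 * 2 ^ K * 1) from by
      rw [Nat.mul_one, pow_succ]; ring_nf]
    rw [pass_eq K 1 (L' ++ R') (by simp [hL'len, hR'len]; ring)]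
    rw [show List.range 1 = [0] from rfl]
    simp only [List.map_cons, List.map_nil, List.foldl_cons, List.foldl_nil, Nat.mul_zero]
    unfold bBlock
    have hb := butterfly (2 ^ K) (2 ^ K) [] L' [] R' (by simp) rfl hL'len hR'len
    simpa using hb

-- A's while-loop equals the passes, given enough fuel
lemma loop_eq_passes (K : Nat) : ∀ (fuel t : Nat) (a : List Int), K - t ≤ fuel →
    isfwhtLoop fuel (2 ^ K) (2 ^ t) a = passesUp (2 ^ K) t (K - t) a := by
  intro fuel
  induction fuel with
  | zero =>
    intro t a hf
    have : K - t = 0 := by omega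
    rw [this]; rfl
  | succ fuel ih =>
    intro t a hf
    simp only [isfwhtLoop]
    by_cases hlt : 2 ^ t < 2 ^ K
    · have htK : t < K := (Nat.pow_lt_pow_iff_right (by norm_num)).mp hlt
      rw [if_pos hlt]
      rw [show 2 ^ t * 2 = 2 ^ (t + 1) from by rw [pow_succ]]
      rw [ih (t + 1) _ (by omega)]
      rw [show K - t = (K - (t + 1)) + 1 from by omega]
      rfl
    · rw [if_neg hlt]
      have : K ≤ t := by
        by_contra hc
        exact hlt (Nat.pow_lt_pow_right (by norm_num) (by omega))
      rw [show K - t = 0 from by omega]; rfl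

-- ===== VERDICT (by name: the statement is the Claim_ definition above) =====
theorem isfwht_spec : Claim_equal_isfwht := by
  intro a _ hPre
  unfold Spec_isfwht isfwht isfwht_alt
  rcases hPre with h0 | ⟨K, _, hK⟩
  · rw [List.length_eq_zero_iff.mp h0]
    rw [isfwhtRec, dif_pos (by simp)]; rfl
  · rw [hK]
    rw [show (1 : Nat) = 2 ^ 0 from rfl]
    rw [loop_eq_passes K (2 ^ K) 0 a (by have := Nat.lt_two_pow_self (n := K); omega)]
    rw [Nat.sub_zero]
    exact passes_eq_rec K a hK
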